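-- pv_equiv track=rewrite | github.com/gaselpijiiy/ocr-engine | app/services/text_cleaning.py | normalize_abbreviations
-- ===== SOURCE A (Python) =====
-- def normalize_abbreviations(text):
--     abbreviations = {
--         "No.": "No",
--         "Dr.": "Dr",
--         "Mr.": "Mr",
--         "Mrs.": "Mrs",
--         "Prof.": "Prof",
--         "dll.": "dll",
--         "dsb.": "dsb",
--         "dst.": "dst",
--     }
--
--     for abbr, repl in abbreviations.items():
--         text = text.replace(abbr, repl)
--
--     return text
-- ===== SOURCE B (Python) =====
-- _ABBRS = [("No.", "No"), ("Dr.", "Dr"), ("Mr.", "Mr"), ("Mrs.", "Mrs"),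
--           ("Prof.", "Prof"), ("dll.", "dll"), ("dsb.", "dsb"), ("dst.", "dst")]
--
--
-- def normalize_abbreviations(text):
--     # One left-to-right scan: at each position take the first abbreviation that
--     # matches (replaced text is never rescanned), instead of eight replace passes.
--     out = []
--     i = 0
--     n = len(text)
--     while i < n:
--         for abbr, repl in _ABBRS:
--             if text.startswith(abbr, i):
--                 out.append(repl)
--                 i += len(abbr)
--                 break
--         else:
--             out.append(text[i])
--             i += 1
--     return "".join(out)
-- ===== Notes on version B (the rewrite author's own statement) =====
-- stated objective: alternative
-- what changed: Replaces A's eight sequential full-string replace passes with a single left-to-right scan that at each position substitutes the first matching abbreviation and never rescans produced text.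
-- intended difference: On texts containing the substring 'Mr.s.', A's 'Mr.'->'Mr' pass manufactures a new 'Mrs.' that its later pass also strips (e.g. A('Mr.s.')='Mrs'), while B's single pass leaves the following 's.' alone (B('Mr.s.')='Mrs.'); B is intended because a replacement's output should not itself be treated as an abbreviation from the source text. — e.g. on normalize_abbreviations("Mr.s."): A returns "Mrs", B returns "Mrs."
import Mathlib
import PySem

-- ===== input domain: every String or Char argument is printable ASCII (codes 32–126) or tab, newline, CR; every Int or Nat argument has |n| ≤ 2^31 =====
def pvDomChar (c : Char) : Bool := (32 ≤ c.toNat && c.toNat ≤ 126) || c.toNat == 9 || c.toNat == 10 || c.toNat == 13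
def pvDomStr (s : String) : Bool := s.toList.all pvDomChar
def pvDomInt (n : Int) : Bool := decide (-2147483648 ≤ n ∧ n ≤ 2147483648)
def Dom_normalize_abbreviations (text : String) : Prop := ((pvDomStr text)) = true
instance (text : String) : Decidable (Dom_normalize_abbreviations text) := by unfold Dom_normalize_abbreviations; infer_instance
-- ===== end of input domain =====

-- B replaces A's eight sequential full-string replace passes by a single left-to-right
-- scan substituting the first matching abbreviation; on the exceptional texts containing
-- "Mr.s." (where A's passes cascade) the stated intended difference D_ applies.

-- ===== PORT A =====
def normalize_abbreviations (text : String) : String :=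
  let abbreviations : List (String × String) :=
    [("No.", "No"), ("Dr.", "Dr"), ("Mr.", "Mr"), ("Mrs.", "Mrs"),
     ("Prof.", "Prof"), ("dll.", "dll"), ("dsb.", "dsb"), ("dst.", "dst")]
  abbreviations.foldl (fun t p => PySem.Str.replace t p.1 p.2) text

-- ===== PORT B =====
def pvAbbrs : List (List Char × List Char) :=
  [("No.".toList, "No".toList), ("Dr.".toList, "Dr".toList), ("Mr.".toList, "Mr".toList),
   ("Mrs.".toList, "Mrs".toList), ("Prof.".toList, "Prof".toList), ("dll.".toList, "dll".toList),
   ("dsb.".toList, "dsb".toList), ("dst.".toList, "dst".toList)]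

-- termination fact for the scan (cited by `decreasing_by` below)
theorem pvAbbrs_key_pos : ∀ p ∈ pvAbbrs, 0 < p.1.length := by decide

-- the single left-to-right scan of Source B: first matching abbreviation is substituted,
-- the produced text is never rescanned
def pvScanB : List Char → List Char
  | [] => []
  | c :: t =>
    match h : pvAbbrs.find? (fun p => p.1.isPrefixOf (c :: t)) with
    | some p => p.2 ++ pvScanB ((c :: t).drop p.1.length)
    | none => c :: pvScanB t
termination_by l => l.length
decreasing_by
  · have hm := List.mem_of_find?_eq_some h
    have hp := pvAbbrs_key_pos p hm
    simp only [List.length_drop, List.length_cons]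
    omega
  · simp

def normalize_abbreviations_alt (text : String) : String :=
  String.ofList (pvScanB text.toList)

-- ===== PRECONDITION & SPEC =====
-- On texts containing the substring "Mr.s.", A's 'Mr.'->'Mr' pass manufactures a new
-- "Mrs." that its later pass also strips (A "Mr.s." = "Mrs"), while B's single pass
-- leaves the following "s." alone (B "Mr.s." = "Mrs."); B's value is the intended one
-- because a replacement's output should not itself be treated as a source abbreviation.
def D_normalize_abbreviations (text : String) : Prop :=
  PySem.Chars.isIn "Mr.s.".toList text.toList = true
instance (text : String) : Decidable (D_normalize_abbreviations text) := by
  unfold D_normalize_abbreviations; infer_instance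

def Spec_normalize_abbreviations (text : String) (out : String) : Prop :=
  ¬ D_normalize_abbreviations text → out = normalize_abbreviations_alt text
instance (text : String) (out : String) : Decidable (Spec_normalize_abbreviations text out) := by
  unfold Spec_normalize_abbreviations; infer_instance

def pvDiffWitness_normalize_abbreviations : String := "Mr.s."
def pvDiffWitnessOut_normalize_abbreviations : String × String := ("Mrs", "Mrs.")

-- ===== CLAIM (what is proved, stated in full; the proofs are below) =====
def Claim_unchanged_normalize_abbreviations : Prop :=
  ∀ (text : String), Dom_normalize_abbreviations text →
    Spec_normalize_abbreviations text (normalize_abbreviations text)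
def Claim_changed_normalize_abbreviations : Prop :=
  Dom_normalize_abbreviations (pvDiffWitness_normalize_abbreviations) ∧
  D_normalize_abbreviations (pvDiffWitness_normalize_abbreviations) ∧
  normalize_abbreviations (pvDiffWitness_normalize_abbreviations) = pvDiffWitnessOut_normalize_abbreviations.1 ∧
  normalize_abbreviations_alt (pvDiffWitness_normalize_abbreviations) = pvDiffWitnessOut_normalize_abbreviations.2 ∧
  pvDiffWitnessOut_normalize_abbreviations.1 ≠ pvDiffWitnessOut_normalize_abbreviations.2
def Claim_exact_normalize_abbreviations : Prop :=
  ∀ (text : String), Dom_normalize_abbreviations text → D_normalize_abbreviations text →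
    normalize_abbreviations text ≠ normalize_abbreviations_alt text

-- ===== LEMMAS AND PROOFS =====

def pvRep (k r : List Char) : List Char → List Char
  | [] => []
  | c :: t => if k.isPrefixOf (c :: t) then r ++ pvRep k r (t.drop (k.length - 1)) else c :: pvRep k r t
termination_by l => l.length
decreasing_by
  · simp only [List.length_drop, List.length_cons]; omega
  · simp

theorem pvRep_cons_neg {k : List Char} (r : List Char) {c : Char} {t : List Char}
    (h : ¬ k <+: c :: t) : pvRep k r (c :: t) = c :: pvRep k r t := by
  rw [pvRep, if_neg]
  simpa [List.isPrefixOf_iff_prefix] using h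

theorem pvRep_cons_pos {k : List Char} (r : List Char) {c : Char} {t : List Char}
    (h : k <+: c :: t) : pvRep k r (c :: t) = r ++ pvRep k r (t.drop (k.length - 1)) := by
  rw [pvRep, if_pos]
  simpa [List.isPrefixOf_iff_prefix] using h

theorem pvRep_fire {k : List Char} (r : List Char) (hk : k ≠ []) (u : List Char) :
    pvRep k r (k ++ u) = r ++ pvRep k r u := by
  cases k with
  | nil => exact absurd rfl hk
  | cons a k' =>
    have hc : (a :: k').isPrefixOf (a :: (k' ++ u)) = true := by
      simp [List.isPrefixOf_iff_prefix]
    rw [List.cons_append, pvRep, if_pos hc]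
    simp

theorem prefix_append_split {p a z : List Char} (h : p <+: a ++ z) : p <+: a ∨ a <+: p := by
  rcases Nat.lt_or_ge a.length p.length with hl | hl
  · right
    have h2 := List.prefix_iff_eq_take.mp h
    rw [List.take_append, List.take_of_length_le (Nat.le_of_lt hl)] at h2
    exact ⟨_, h2.symm⟩
  · left
    have h2 := List.prefix_iff_eq_take.mp h
    rw [List.take_append, Nat.sub_eq_zero_of_le hl, List.take_zero,
      List.append_nil] at h2
    exact h2 ▸ List.take_prefix _ _

theorem infix_append_cases : ∀ (a : List Char) {p z : List Char}, p <:+: a ++ z →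
    (∃ m, m < a.length ∧ p <+: a.drop m ++ z) ∨ p <:+: z := by
  intro a
  induction a with
  | nil => intro p z h; right; simpa using h
  | cons c a' ih =>
    intro p z h
    rw [List.cons_append, List.infix_cons_iff] at h
    rcases h with h | h
    · exact Or.inl ⟨0, by simp, by simpa using h⟩
    · rcases ih h with ⟨m, hm, hp⟩ | h2
      · exact Or.inl ⟨m + 1, by simpa using hm, by simpa using hp⟩
      · exact Or.inr h2

theorem pvRep_prefix_stable (k r : List Char) :
    ∀ (y p : List Char), (∀ m, m < p.length → ¬ (p.drop m <+: r) ∧ ¬ (r <+: p.drop m)) →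
      p <+: pvRep k r y → p <+: y := by
  suffices H : ∀ (n : Nat) (y p : List Char), y.length ≤ n →
      (∀ m, m < p.length → ¬ (p.drop m <+: r) ∧ ¬ (r <+: p.drop m)) →
      p <+: pvRep k r y → p <+: y by
    exact fun y p h hp => H y.length y p le_rfl h hp
  intro n
  induction n with
  | zero =>
    intro y p hy _ hp
    have : y = [] := List.eq_nil_of_length_eq_zero (Nat.le_zero.mp hy)
    subst this
    simpa [pvRep] using hp
  | succ n ih =>
    intro y p hy hyp hp
    cases y with
    | nil => simpa [pvRep] using hp
    | cons c t =>
      by_cases hf : k <+: c :: t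
      · rw [pvRep_cons_pos r hf] at hp
        cases p with
        | nil => exact List.nil_prefix
        | cons c' p' =>
          rcases prefix_append_split hp with h | h
          · exact absurd h (hyp 0 (by simp)).1
          · exact absurd h (hyp 0 (by simp)).2
      · rw [pvRep_cons_neg r hf] at hp
        cases p with
        | nil => exact List.nil_prefix
        | cons c' p' =>
          rw [List.cons_prefix_cons] at hp ⊢
          refine ⟨hp.1, ih t p' (by simpa using hy) (fun m hm => ?_) hp.2⟩
          exact hyp (m + 1) (by simpa using hm)

theorem pvRep_infix_stable (k r p : List Char)
    (h1 : ∀ m, m < p.length → ¬ (p.drop m <+: r) ∧ ¬ (r <+: p.drop m))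
    (h2 : ∀ m, m < r.length → ¬ (p <+: r.drop m) ∧ ¬ (r.drop m <+: p)) :
    ∀ y, p <:+: pvRep k r y → p <:+: y := by
  suffices H : ∀ (n : Nat) (y : List Char), y.length ≤ n → p <:+: pvRep k r y → p <:+: y by
    exact fun y h => H y.length y le_rfl h
  intro n
  induction n with
  | zero =>
    intro y hy hp
    have : y = [] := List.eq_nil_of_length_eq_zero (Nat.le_zero.mp hy)
    subst this
    simpa [pvRep] using hp
  | succ n ih =>
    intro y hy hp
    cases y with
    | nil => simpa [pvRep] using hp
    | cons c t =>
      by_cases hf : k <+: c :: t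
      · rw [pvRep_cons_pos r hf] at hp
        rcases infix_append_cases r hp with ⟨m, hm, hpre⟩ | hin
        · cases p with
          | nil => exact List.nil_infix
          | cons c' p' =>
            rcases prefix_append_split hpre with h | h
            · exact absurd h (h2 m hm).1
            · exact absurd h (h2 m hm).2
        · have h3 : p <:+: t.drop (k.length - 1) :=
            ih _ (by simp only [List.length_drop]; simp at hy; omega) hin
          have h4 : t.drop (k.length - 1) <:+: c :: t :=
            ((List.drop_suffix _ _).trans (List.suffix_cons _ _)).isInfix
          exact h3.trans h4
      · rw [pvRep_cons_neg r hf] at hp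
        rw [List.infix_cons_iff] at hp ⊢
        rcases hp with hp | hp
        · left
          have : p <+: pvRep k r (c :: t) := by rw [pvRep_cons_neg r hf]; exact hp
          exact pvRep_prefix_stable k r (c :: t) p h1 this
        · right
          exact ih t (by simpa using hy) hp

theorem pvRep_append (k r : List Char) :
    ∀ (u z : List Char), (∀ m, m < u.length → ¬ (k <+: u.drop m) ∧ ¬ (u.drop m <+: k)) →
      pvRep k r (u ++ z) = u ++ pvRep k r z := by
  intro u
  induction u with
  | nil => simp
  | cons c u' ih =>
    intro z hyp
    rw [List.cons_append]
    have hf : ¬ k <+: c :: (u' ++ z) := by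
      intro h
      rcases prefix_append_split (p := k) (a := c :: u') (z := z) (by simpa using h) with h2 | h2
      · exact (hyp 0 (by simp)).1 h2
      · exact (hyp 0 (by simp)).2 h2
    rw [pvRep_cons_neg r hf, ih z (fun m hm => hyp (m + 1) (by simpa using hm))]; simp

def pvScanKeys (ks : List (List Char × List Char)) : List Char → List Char
  | [] => []
  | c :: t =>
    match ks.find? (fun p => p.1.isPrefixOf (c :: t)) with
    | some p => p.2 ++ pvScanKeys ks (t.drop (p.1.length - 1))
    | none => c :: pvScanKeys ks t
termination_by l => l.length
decreasing_by
  · simp only [List.length_drop, List.length_cons]; omega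
  · simp

theorem scanK_nil (ks : List (List Char × List Char)) : pvScanKeys ks [] = [] := by
  simp [pvScanKeys]

theorem scanK_cons (ks : List (List Char × List Char)) (c : Char) (t : List Char) :
    pvScanKeys ks (c :: t) =
      match ks.find? (fun p => p.1.isPrefixOf (c :: t)) with
      | some p => p.2 ++ pvScanKeys ks (t.drop (p.1.length - 1))
      | none => c :: pvScanKeys ks t := by
  rw [pvScanKeys]

theorem scanK_none {ks : List (List Char × List Char)} {c : Char} {t : List Char}
    (h : ∀ p ∈ ks, ¬ p.1 <+: c :: t) : pvScanKeys ks (c :: t) = c :: pvScanKeys ks t := by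
  rw [scanK_cons, List.find?_eq_none.mpr]
  intro p hp
  simpa [List.isPrefixOf_iff_prefix] using h p hp

theorem scanK_some {ks : List (List Char × List Char)} {c : Char} {t : List Char} {q : List Char × List Char}
    (h : ks.find? (fun p => p.1.isPrefixOf (c :: t)) = some q) :
    pvScanKeys ks (c :: t) = q.2 ++ pvScanKeys ks (t.drop (q.1.length - 1)) := by
  rw [scanK_cons, h]

theorem scanK_append (ks : List (List Char × List Char)) :
    ∀ (a z : List Char), (∀ p ∈ ks, ∀ m, m < a.length → ¬ (p.1 <+: a.drop m) ∧ ¬ (a.drop m <+: p.1)) →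
      pvScanKeys ks (a ++ z) = a ++ pvScanKeys ks z := by
  intro a
  induction a with
  | nil => simp
  | cons c a' ih =>
    intro z hyp
    rw [List.cons_append]
    have hnone : ∀ p ∈ ks, ¬ p.1 <+: c :: (a' ++ z) := by
      intro p hp hpre
      rcases prefix_append_split (p := p.1) (a := c :: a') (z := z) (by simpa using hpre) with h2 | h2
      · exact (hyp p hp 0 (by simp)).1 h2
      · exact (hyp p hp 0 (by simp)).2 h2
    rw [scanK_none hnone, ih z (fun p hp m hm => hyp p hp (m + 1) (by simpa using hm))]
    simp

theorem find?_congr' {α : Type} (f g : α → Bool) :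
    ∀ l : List α, (∀ x ∈ l, f x = g x) → l.find? f = l.find? g := by
  intro l
  induction l with
  | nil => intro _; rfl
  | cons a l ih =>
    intro h
    rw [List.find?_cons, List.find?_cons, h a (List.mem_cons_self ..)]
    cases hga : g a with
    | true => rfl
    | false => exact ih (fun x hx => h x (List.mem_cons_of_mem _ hx))

theorem find?_congr_append {ks : List (List Char × List Char)}
    (hpp : ∀ p ∈ ks, ∀ q ∈ ks, p.1 <+: q.1 → p.1 = q.1)
    {p' : List Char × List Char} (hp' : p' ∈ ks) (u v : List Char) :
    ks.find? (fun x => x.1.isPrefixOf (p'.1 ++ u)) = ks.find? (fun x => x.1.isPrefixOf (p'.1 ++ v)) := by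
  have key : ∀ (x : List Char × List Char), x ∈ ks → ∀ (w w' : List Char),
      x.1 <+: p'.1 ++ w → x.1 <+: p'.1 ++ w' := by
    intro x hx w w' hpre
    rcases prefix_append_split hpre with h | h
    · exact h.trans (List.prefix_append _ _)
    · rw [hpp p' hp' x hx h]
      exact List.prefix_append _ _
  apply find?_congr'
  intro x hx
  apply Bool.eq_iff_iff.mpr
  simp only [List.isPrefixOf_iff_prefix]
  exact ⟨key x hx u v, key x hx v u⟩

theorem fuse (k r : List Char) (ks : List (List Char × List Char)) (Good : List Char → Prop)
    (hk : k ≠ [])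
    (hks : ∀ p ∈ ks, p.1 ≠ [])
    (hkk : ∀ p ∈ ks, ∀ m, m < p.1.length → ¬ (k <+: p.1.drop m) ∧ ¬ (p.1.drop m <+: k))
    (hpp : ∀ p ∈ ks, ∀ q ∈ ks, p.1 <+: q.1 → p.1 = q.1)
    (hGood : ∀ u y, u <:+ y → Good y → Good u)
    (hA : ∀ u, Good (k ++ u) → pvScanKeys ks (r ++ pvRep k r u) = r ++ pvScanKeys ks (pvRep k r u))
    (hB : ∀ y, Good y → ¬ k <+: y → ∀ p ∈ ks, p.1 <+: pvRep k r y → p.1 <+: y) :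
    ∀ y, Good y → pvScanKeys ks (pvRep k r y) = pvScanKeys ((k, r) :: ks) y := by
  suffices H : ∀ (n : Nat) (y : List Char), y.length ≤ n → Good y →
      pvScanKeys ks (pvRep k r y) = pvScanKeys ((k, r) :: ks) y by
    exact fun y hg => H y.length y le_rfl hg
  intro n
  induction n with
  | zero =>
    intro y hy _
    have : y = [] := List.eq_nil_of_length_eq_zero (Nat.le_zero.mp hy)
    subst this
    simp [pvRep, scanK_nil]
  | succ n ih =>
    intro y hy hg
    cases y with
    | nil => simp [pvRep, scanK_nil]
    | cons c t =>
      by_cases hf : k <+: c :: t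
      · -- the first key fires
        obtain ⟨u, hu⟩ := hf
        cases k with
        | nil => exact absurd rfl hk
        | cons a k' =>
          rw [List.cons_append] at hu
          injection hu with h1 h2
          subst h1
          subst h2
          have hlen : u.length ≤ n := by
            simp only [List.length_cons, List.length_append] at hy
            omega
          have hgu : Good ((a :: k') ++ u) := hg
          conv_lhs => rw [show (a :: (k' ++ u)) = (a :: k') ++ u from rfl,
            pvRep_fire r hk u]
          rw [hA u hgu]
          have hfind : ((a :: k', r) :: ks).find?
              (fun p => p.1.isPrefixOf (a :: (k' ++ u))) = some (a :: k', r) := by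
            rw [List.find?_cons]
            have : (a :: k').isPrefixOf (a :: (k' ++ u)) = true := by
              simp [List.isPrefixOf_iff_prefix]
            rw [this]
          rw [scanK_some hfind]
          simp only [List.length_cons, Nat.add_sub_cancel, List.drop_left]
          rw [ih u hlen (hGood u ((a :: k') ++ u) ⟨a :: k', rfl⟩ hgu)]
      · -- the first key does not fire
        have hrw : pvRep k r (c :: t) = c :: pvRep k r t := pvRep_cons_neg r hf
        have hfind0 : ((k, r) :: ks).find? (fun p => p.1.isPrefixOf (c :: t)) =
            ks.find? (fun p => p.1.isPrefixOf (c :: t)) := by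
          rw [List.find?_cons]
          have : k.isPrefixOf (c :: t) = false := by
            rw [Bool.eq_false_iff]
            simpa [List.isPrefixOf_iff_prefix] using hf
          rw [this]
        cases h2 : ks.find? (fun p => p.1.isPrefixOf (c :: t)) with
        | none =>
          have hnone : ∀ p ∈ ks, ¬ p.1 <+: c :: pvRep k r t := by
            intro p hp hpre
            have hpre2 : p.1 <+: pvRep k r (c :: t) := by rw [hrw]; exact hpre
            have h3 := hB (c :: t) hg hf p hp hpre2
            exact (List.find?_eq_none.mp h2 p hp)
              (by simpa [List.isPrefixOf_iff_prefix] using h3)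
          rw [hrw, scanK_none hnone, scanK_cons ((k, r) :: ks), hfind0, h2,
            ih t (by simpa using hy) (hGood t (c :: t) (List.suffix_cons c t) hg)]
        | some p' =>
          have hmem := List.mem_of_find?_eq_some h2
          have hpre : p'.1 <+: c :: t := by
            simpa [List.isPrefixOf_iff_prefix] using List.find?_some h2
          obtain ⟨u, hu⟩ := hpre
          obtain ⟨b, w, hbw⟩ : ∃ b w, p'.1 = b :: w := by
            cases hp : p'.1 with
            | nil => exact absurd hp (hks p' hmem)
            | cons b w => exact ⟨b, w, rfl⟩
          rw [hbw, List.cons_append] at hu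
          injection hu with hb ht
          subst hb
          subst ht
          -- now t = w ++ u and p'.1 = b :: w with b = c
          have hlenu : u.length ≤ n := by
            simp only [List.length_cons, List.length_append] at hy
            omega
          have hgoodu : Good u := hGood u (b :: (w ++ u)) ⟨b :: w, rfl⟩ hg
          have hrep : pvRep k r (b :: (w ++ u)) = (b :: w) ++ pvRep k r u := by
            rw [show (b :: (w ++ u)) = (b :: w) ++ u from rfl]
            exact pvRep_append k r (b :: w) u (by rw [← hbw]; exact hkk p' hmem)
          have hfind2 : ks.find? (fun p => p.1.isPrefixOf ((b :: w) ++ pvRep k r u)) =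
              some p' := by
            have := find?_congr_append hpp hmem (pvRep k r u) u
            rw [hbw] at this
            rw [this]
            rw [show (b :: w) ++ u = b :: (w ++ u) from rfl]
            exact h2
          have hfind3 : ks.find? (fun p => p.1.isPrefixOf (b :: (w ++ pvRep k r u))) =
              some p' := hfind2
          conv_lhs => rw [hrep, show (b :: w) ++ pvRep k r u = b :: (w ++ pvRep k r u) from rfl]
          rw [scanK_some hfind3, scanK_some (q := p') (by rw [hfind0]; exact h2), hbw]
          simp only [List.length_cons, Nat.add_sub_cancel, List.drop_left]
          rw [ih u hlenu hgoodu]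

theorem go_eq (old new : List Char) (hold : old ≠ []) :
    ∀ (fuel : Nat) (l acc : List Char), l.length ≤ fuel →
      PySem.Chars.replace.go old new fuel l acc = acc.reverse ++ pvRep old new l := by
  intro fuel
  induction fuel with
  | zero =>
    intro l acc h
    have : l = [] := List.eq_nil_of_length_eq_zero (Nat.le_zero.mp h)
    subst this
    simp [PySem.Chars.replace.go, pvRep]
  | succ n ih =>
    intro l acc h
    cases l with
    | nil => simp [PySem.Chars.replace.go, pvRep]
    | cons c t =>
      rw [PySem.Chars.replace.go]
      by_cases hpre : old.isPrefixOf (c :: t) = true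
      · rw [if_pos hpre]
        obtain ⟨a, old', rfl⟩ : ∃ a old', old = a :: old' := by
          cases old with
          | nil => exact absurd rfl hold
          | cons a o => exact ⟨a, o, rfl⟩
        have hlen : ((c :: t).drop (a :: old').length).length ≤ n := by
          simp only [List.length_drop, List.length_cons] at *
          omega
        rw [ih _ _ hlen]
        rw [pvRep, if_pos hpre]
        simp [List.drop_succ_cons]
      · rw [if_neg hpre]
        rw [ih t (c :: acc) (by simpa using h)]
        rw [pvRep, if_neg hpre]
        simp

theorem rep_eq_replace (s k r : List Char) (hk : k ≠ []) :
    PySem.Chars.replace s k r = pvRep k r s := by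
  unfold PySem.Chars.replace
  rw [if_neg (by simpa [List.isEmpty_iff] using hk)]
  simpa using go_eq k r hk s.length s [] le_rfl

theorem mrs_prefix_stable : ∀ y, ¬ "Mr.".toList <+: y →
    "Mrs.".toList <+: pvRep "Mr.".toList "Mr".toList y → "Mrs.".toList <+: y := by
  intro y hnf hpre
  cases y with
  | nil => exact absurd (by simpa [pvRep] using hpre : "Mrs.".toList = []) (by decide)
  | cons c t =>
    rw [pvRep_cons_neg _ hnf] at hpre
    rw [show ("Mrs.".toList) = 'M' :: "rs.".toList from rfl, List.cons_prefix_cons] at hpre ⊢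
    obtain ⟨hc, hpre⟩ := hpre
    exact ⟨hc, pvRep_prefix_stable "Mr.".toList "Mr".toList t "rs.".toList (by decide) hpre⟩

theorem fuse3_hA : ∀ u, ¬ ("Mr.s.".toList <:+: "Mr.".toList ++ u) →
    pvScanKeys (pvAbbrs.drop 3) ("Mr".toList ++ pvRep "Mr.".toList "Mr".toList u) =
      "Mr".toList ++ pvScanKeys (pvAbbrs.drop 3) (pvRep "Mr.".toList "Mr".toList u) := by
  intro u hinf
  have hs : ¬ ("s.".toList <+: pvRep "Mr.".toList "Mr".toList u) := by
    intro hsp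
    have hsu := pvRep_prefix_stable "Mr.".toList "Mr".toList u "s.".toList (by decide) hsp
    apply hinf
    obtain ⟨w, hw⟩ := hsu
    exact ⟨[], w, by rw [← hw]; rfl⟩
  have h1 : ∀ p ∈ pvAbbrs.drop 3, ¬ p.1 <+: 'M' :: ('r' :: pvRep "Mr.".toList "Mr".toList u) := by
    intro p hp hpre
    simp only [pvAbbrs, List.drop_succ_cons, List.drop_zero, List.mem_cons,
      List.not_mem_nil, or_false] at hp
    rcases hp with h | h | h | h | h <;> subst h
    · rw [show ("Mrs.".toList) = 'M' :: ('r' :: "s.".toList) from rfl,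
        List.cons_prefix_cons] at hpre
      obtain ⟨-, hpre⟩ := hpre
      rw [List.cons_prefix_cons] at hpre
      exact hs hpre.2
    · rw [show ("Prof.".toList) = 'P' :: "rof.".toList from rfl, List.cons_prefix_cons] at hpre
      exact absurd hpre.1 (by decide)
    · rw [show ("dll.".toList) = 'd' :: "ll.".toList from rfl, List.cons_prefix_cons] at hpre
      exact absurd hpre.1 (by decide)
    · rw [show ("dsb.".toList) = 'd' :: "sb.".toList from rfl, List.cons_prefix_cons] at hpre
      exact absurd hpre.1 (by decide)
    · rw [show ("dst.".toList) = 'd' :: "st.".toList from rfl, List.cons_prefix_cons] at hpre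
      exact absurd hpre.1 (by decide)
  have h2 : ∀ p ∈ pvAbbrs.drop 3, ¬ p.1 <+: 'r' :: pvRep "Mr.".toList "Mr".toList u := by
    intro p hp hpre
    simp only [pvAbbrs, List.drop_succ_cons, List.drop_zero, List.mem_cons,
      List.not_mem_nil, or_false] at hp
    rcases hp with h | h | h | h | h <;> subst h
    · exact absurd (List.cons_prefix_cons.mp
        (show ('M' :: "rs.".toList) <+: _ from hpre)).1 (by decide)
    · exact absurd (List.cons_prefix_cons.mp
        (show ('P' :: "rof.".toList) <+: _ from hpre)).1 (by decide)
    · exact absurd (List.cons_prefix_cons.mp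
        (show ('d' :: "ll.".toList) <+: _ from hpre)).1 (by decide)
    · exact absurd (List.cons_prefix_cons.mp
        (show ('d' :: "sb.".toList) <+: _ from hpre)).1 (by decide)
    · exact absurd (List.cons_prefix_cons.mp
        (show ('d' :: "st.".toList) <+: _ from hpre)).1 (by decide)
  show pvScanKeys (pvAbbrs.drop 3) ('M' :: ('r' :: pvRep "Mr.".toList "Mr".toList u)) =
    'M' :: ('r' :: pvScanKeys (pvAbbrs.drop 3) (pvRep "Mr.".toList "Mr".toList u))
  rw [scanK_none h1, scanK_none h2]

theorem scanK_empty : ∀ z, pvScanKeys [] z = z := by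
  intro z
  induction z with
  | nil => exact scanK_nil []
  | cons c t ih => rw [scanK_none (by simp), ih]

theorem fuse_plain (k r : List Char) (ks : List (List Char × List Char))
    (hk : k ≠ [])
    (hks : ∀ p ∈ ks, p.1 ≠ [])
    (hkk : ∀ p ∈ ks, ∀ m, m < p.1.length → ¬ (k <+: p.1.drop m) ∧ ¬ (p.1.drop m <+: k))
    (hpp : ∀ p ∈ ks, ∀ q ∈ ks, p.1 <+: q.1 → p.1 = q.1)
    (hscan : ∀ p ∈ ks, ∀ m, m < r.length → ¬ (p.1 <+: r.drop m) ∧ ¬ (r.drop m <+: p.1))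
    (hps : ∀ p ∈ ks, ∀ m, m < p.1.length → ¬ (p.1.drop m <+: r) ∧ ¬ (r <+: p.1.drop m)) :
    ∀ y, pvScanKeys ks (pvRep k r y) = pvScanKeys ((k, r) :: ks) y :=
  fun y => fuse k r ks (fun _ => True) hk hks hkk hpp (fun _ _ _ _ => trivial)
    (fun u _ => scanK_append ks r (pvRep k r u) hscan)
    (fun y _ _ p hp hpre => pvRep_prefix_stable k r y p.1 (hps p hp) hpre)
    y trivial

theorem fuse3 : ∀ y, ¬ ("Mr.s.".toList <:+: y) →
    pvScanKeys (pvAbbrs.drop 3) (pvRep "Mr.".toList "Mr".toList y) =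
      pvScanKeys (("Mr.".toList, "Mr".toList) :: pvAbbrs.drop 3) y :=
  fuse "Mr.".toList "Mr".toList (pvAbbrs.drop 3) (fun y => ¬ ("Mr.s.".toList <:+: y))
    (by decide) (by decide) (by decide) (by decide)
    (fun u y hsuf hg hin => hg (hin.trans hsuf.isInfix))
    fuse3_hA
    (by
      intro y _ hnf p hp hpre
      simp only [pvAbbrs, List.drop_succ_cons, List.drop_zero, List.mem_cons,
        List.not_mem_nil, or_false] at hp
      rcases hp with h | h | h | h | h <;> subst h
      · exact mrs_prefix_stable y hnf hpre
      · exact pvRep_prefix_stable _ _ y _ (by decide) hpre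
      · exact pvRep_prefix_stable _ _ y _ (by decide) hpre
      · exact pvRep_prefix_stable _ _ y _ (by decide) hpre
      · exact pvRep_prefix_stable _ _ y _ (by decide) hpre)

theorem chain_eq (l : List Char) (hinf : ¬ ("Mr.s.".toList <:+: l)) :
    pvRep "dst.".toList "dst".toList (pvRep "dsb.".toList "dsb".toList
      (pvRep "dll.".toList "dll".toList (pvRep "Prof.".toList "Prof".toList
        (pvRep "Mrs.".toList "Mrs".toList (pvRep "Mr.".toList "Mr".toList
          (pvRep "Dr.".toList "Dr".toList (pvRep "No.".toList "No".toList l))))))) =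
    pvScanKeys pvAbbrs l := by
  have hinf1 : ¬ ("Mr.s.".toList <:+: pvRep "No.".toList "No".toList l) := fun h =>
    hinf (pvRep_infix_stable "No.".toList "No".toList "Mr.s.".toList
      (by decide) (by decide) l h)
  have hinf2 : ¬ ("Mr.s.".toList <:+:
      pvRep "Dr.".toList "Dr".toList (pvRep "No.".toList "No".toList l)) := fun h =>
    hinf1 (pvRep_infix_stable "Dr.".toList "Dr".toList "Mr.s.".toList
      (by decide) (by decide) _ h)
  symm
  calc pvScanKeys pvAbbrs l
      = pvScanKeys (pvAbbrs.drop 1) (pvRep "No.".toList "No".toList l) :=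
        (fuse_plain "No.".toList "No".toList (pvAbbrs.drop 1)
          (by decide) (by decide) (by decide) (by decide) (by decide) (by decide) l).symm
    _ = pvScanKeys (pvAbbrs.drop 2) (pvRep "Dr.".toList "Dr".toList
          (pvRep "No.".toList "No".toList l)) :=
        (fuse_plain "Dr.".toList "Dr".toList (pvAbbrs.drop 2)
          (by decide) (by decide) (by decide) (by decide) (by decide) (by decide) _).symm
    _ = pvScanKeys (pvAbbrs.drop 3) (pvRep "Mr.".toList "Mr".toList
          (pvRep "Dr.".toList "Dr".toList (pvRep "No.".toList "No".toList l))) :=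
        (fuse3 _ hinf2).symm
    _ = pvScanKeys (pvAbbrs.drop 4) (pvRep "Mrs.".toList "Mrs".toList
          (pvRep "Mr.".toList "Mr".toList (pvRep "Dr.".toList "Dr".toList
            (pvRep "No.".toList "No".toList l)))) :=
        (fuse_plain "Mrs.".toList "Mrs".toList (pvAbbrs.drop 4)
          (by decide) (by decide) (by decide) (by decide) (by decide) (by decide) _).symm
    _ = pvScanKeys (pvAbbrs.drop 5) (pvRep "Prof.".toList "Prof".toList
          (pvRep "Mrs.".toList "Mrs".toList (pvRep "Mr.".toList "Mr".toList
            (pvRep "Dr.".toList "Dr".toList (pvRep "No.".toList "No".toList l))))) :=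
        (fuse_plain "Prof.".toList "Prof".toList (pvAbbrs.drop 5)
          (by decide) (by decide) (by decide) (by decide) (by decide) (by decide) _).symm
    _ = pvScanKeys (pvAbbrs.drop 6) (pvRep "dll.".toList "dll".toList
          (pvRep "Prof.".toList "Prof".toList (pvRep "Mrs.".toList "Mrs".toList
            (pvRep "Mr.".toList "Mr".toList (pvRep "Dr.".toList "Dr".toList
              (pvRep "No.".toList "No".toList l)))))) :=
        (fuse_plain "dll.".toList "dll".toList (pvAbbrs.drop 6)
          (by decide) (by decide) (by decide) (by decide) (by decide) (by decide) _).symm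
    _ = pvScanKeys (pvAbbrs.drop 7) (pvRep "dsb.".toList "dsb".toList
          (pvRep "dll.".toList "dll".toList (pvRep "Prof.".toList "Prof".toList
            (pvRep "Mrs.".toList "Mrs".toList (pvRep "Mr.".toList "Mr".toList
              (pvRep "Dr.".toList "Dr".toList (pvRep "No.".toList "No".toList l))))))) :=
        (fuse_plain "dsb.".toList "dsb".toList (pvAbbrs.drop 7)
          (by decide) (by decide) (by decide) (by decide) (by decide) (by decide) _).symm
    _ = pvScanKeys (pvAbbrs.drop 8) (pvRep "dst.".toList "dst".toList
          (pvRep "dsb.".toList "dsb".toList (pvRep "dll.".toList "dll".toList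
            (pvRep "Prof.".toList "Prof".toList (pvRep "Mrs.".toList "Mrs".toList
              (pvRep "Mr.".toList "Mr".toList (pvRep "Dr.".toList "Dr".toList
                (pvRep "No.".toList "No".toList l)))))))) :=
        (fuse_plain "dst.".toList "dst".toList (pvAbbrs.drop 8)
          (by decide) (by decide) (by decide) (by decide) (by decide) (by decide) _).symm
    _ = _ := scanK_empty _

theorem str_replace_eq (s o n : String) (h : o.toList ≠ []) :
    PySem.Str.replace s o n = String.ofList (pvRep o.toList n.toList s.toList) := by
  unfold PySem.Str.replace
  rw [rep_eq_replace _ _ _ h]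

theorem A_eq (text : String) :
    normalize_abbreviations text = String.ofList
      (pvRep "dst.".toList "dst".toList (pvRep "dsb.".toList "dsb".toList
        (pvRep "dll.".toList "dll".toList (pvRep "Prof.".toList "Prof".toList
          (pvRep "Mrs.".toList "Mrs".toList (pvRep "Mr.".toList "Mr".toList
            (pvRep "Dr.".toList "Dr".toList (pvRep "No.".toList "No".toList text.toList)))))))) := by
  simp only [normalize_abbreviations, List.foldl_cons, List.foldl_nil]
  rw [str_replace_eq _ _ _ (by decide), String.toList_ofList,
      str_replace_eq _ _ _ (by decide), String.toList_ofList,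
      str_replace_eq _ _ _ (by decide), String.toList_ofList,
      str_replace_eq _ _ _ (by decide), String.toList_ofList,
      str_replace_eq _ _ _ (by decide), String.toList_ofList,
      str_replace_eq _ _ _ (by decide), String.toList_ofList,
      str_replace_eq _ _ _ (by decide), String.toList_ofList,
      str_replace_eq _ _ _ (by decide), String.toList_ofList]
  simp only [String.toList_ofList]

theorem pvScanB_eq : ∀ l, pvScanB l = pvScanKeys pvAbbrs l := by
  intro l
  fun_induction pvScanB l with
  | case1 => simp [scanK_nil]
  | case2 c t p h ih =>
    rw [scanK_some h, ih]
    have hp := pvAbbrs_key_pos p (List.mem_of_find?_eq_some h)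
    obtain ⟨m, hm⟩ : ∃ m, p.1.length = m + 1 := ⟨p.1.length - 1, by omega⟩
    rw [hm]
    simp [List.drop_succ_cons]
  | case3 c t h ih =>
    rw [scanK_cons, h, ih]

theorem alt_eq (text : String) :
    normalize_abbreviations_alt text = String.ofList (pvScanKeys pvAbbrs text.toList) := by
  unfold normalize_abbreviations_alt
  rw [pvScanB_eq]

def pvChain (l : List Char) : List Char :=
  pvRep "dst.".toList "dst".toList (pvRep "dsb.".toList "dsb".toList
    (pvRep "dll.".toList "dll".toList (pvRep "Prof.".toList "Prof".toList
      (pvRep "Mrs.".toList "Mrs".toList (pvRep "Mr.".toList "Mr".toList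
        (pvRep "Dr.".toList "Dr".toList (pvRep "No.".toList "No".toList l)))))))

theorem pvChain_eq_scan (l : List Char) (hinf : ¬ ("Mr.s.".toList <:+: l)) :
    pvChain l = pvScanKeys pvAbbrs l := chain_eq l hinf

theorem no_key_head {c : Char} (t : List Char)
    (hc : c ≠ 'N' ∧ c ≠ 'D' ∧ c ≠ 'M' ∧ c ≠ 'P' ∧ c ≠ 'd') :
    ∀ p ∈ pvAbbrs, ¬ p.1 <+: c :: t := by
  intro p hp hpre
  simp only [pvAbbrs, List.mem_cons, List.not_mem_nil, or_false] at hp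
  rcases hp with h|h|h|h|h|h|h|h <;> subst h
  · exact hc.1 (List.cons_prefix_cons.mp (show ('N' :: "o.".toList) <+: c :: t from hpre)).1.symm
  · exact hc.2.1 (List.cons_prefix_cons.mp (show ('D' :: "r.".toList) <+: c :: t from hpre)).1.symm
  · exact hc.2.2.1 (List.cons_prefix_cons.mp (show ('M' :: "r.".toList) <+: c :: t from hpre)).1.symm
  · exact hc.2.2.1 (List.cons_prefix_cons.mp (show ('M' :: "rs.".toList) <+: c :: t from hpre)).1.symm
  · exact hc.2.2.2.1 (List.cons_prefix_cons.mp (show ('P' :: "rof.".toList) <+: c :: t from hpre)).1.symm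
  · exact hc.2.2.2.2 (List.cons_prefix_cons.mp (show ('d' :: "ll.".toList) <+: c :: t from hpre)).1.symm
  · exact hc.2.2.2.2 (List.cons_prefix_cons.mp (show ('d' :: "sb.".toList) <+: c :: t from hpre)).1.symm
  · exact hc.2.2.2.2 (List.cons_prefix_cons.mp (show ('d' :: "st.".toList) <+: c :: t from hpre)).1.symm

theorem rep4_through_Mr (X : List Char) (hX : ¬ "s.".toList <+: X) :
    pvRep "Mrs.".toList "Mrs".toList ("Mr".toList ++ X) =
      "Mr".toList ++ pvRep "Mrs.".toList "Mrs".toList X := by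
  show pvRep "Mrs.".toList "Mrs".toList ('M' :: ('r' :: X)) =
    'M' :: ('r' :: pvRep "Mrs.".toList "Mrs".toList X)
  have h1 : ¬ "Mrs.".toList <+: 'M' :: ('r' :: X) := by
    intro h
    exact hX ((List.cons_prefix_cons.mp
      ((List.cons_prefix_cons.mp (show ('M' :: ('r' :: "s.".toList)) <+: _ from h)).2)).2)
  have h2 : ¬ "Mrs.".toList <+: 'r' :: X := fun h =>
    absurd (List.cons_prefix_cons.mp (show ('M' :: "rs.".toList) <+: _ from h)).1 (by decide)
  rw [pvRep_cons_neg _ h1, pvRep_cons_neg _ h2]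

theorem chain_key_No (u : List Char) :
    pvChain ("No.".toList ++ u) = "No".toList ++ pvChain u := by
  unfold pvChain
  rw [pvRep_fire _ (by decide) u,
    pvRep_append _ _ "No".toList _ (by decide), pvRep_append _ _ "No".toList _ (by decide),
    pvRep_append _ _ "No".toList _ (by decide), pvRep_append _ _ "No".toList _ (by decide),
    pvRep_append _ _ "No".toList _ (by decide), pvRep_append _ _ "No".toList _ (by decide),
    pvRep_append _ _ "No".toList _ (by decide)]

theorem chain_key_Dr (u : List Char) :
    pvChain ("Dr.".toList ++ u) = "Dr".toList ++ pvChain u := by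
  unfold pvChain
  rw [pvRep_append _ _ "Dr.".toList _ (by decide), pvRep_fire _ (by decide) _,
    pvRep_append _ _ "Dr".toList _ (by decide), pvRep_append _ _ "Dr".toList _ (by decide),
    pvRep_append _ _ "Dr".toList _ (by decide), pvRep_append _ _ "Dr".toList _ (by decide),
    pvRep_append _ _ "Dr".toList _ (by decide), pvRep_append _ _ "Dr".toList _ (by decide)]

theorem chain_key_Mrs (u : List Char) :
    pvChain ("Mrs.".toList ++ u) = "Mrs".toList ++ pvChain u := by
  unfold pvChain
  rw [pvRep_append _ _ "Mrs.".toList _ (by decide), pvRep_append _ _ "Mrs.".toList _ (by decide),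
    pvRep_append _ _ "Mrs.".toList _ (by decide), pvRep_fire _ (by decide) _,
    pvRep_append _ _ "Mrs".toList _ (by decide), pvRep_append _ _ "Mrs".toList _ (by decide),
    pvRep_append _ _ "Mrs".toList _ (by decide), pvRep_append _ _ "Mrs".toList _ (by decide)]

theorem chain_key_Prof (u : List Char) :
    pvChain ("Prof.".toList ++ u) = "Prof".toList ++ pvChain u := by
  unfold pvChain
  rw [pvRep_append _ _ "Prof.".toList _ (by decide), pvRep_append _ _ "Prof.".toList _ (by decide),
    pvRep_append _ _ "Prof.".toList _ (by decide), pvRep_append _ _ "Prof.".toList _ (by decide),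
    pvRep_fire _ (by decide) _,
    pvRep_append _ _ "Prof".toList _ (by decide), pvRep_append _ _ "Prof".toList _ (by decide),
    pvRep_append _ _ "Prof".toList _ (by decide)]

theorem chain_key_dll (u : List Char) :
    pvChain ("dll.".toList ++ u) = "dll".toList ++ pvChain u := by
  unfold pvChain
  rw [pvRep_append _ _ "dll.".toList _ (by decide), pvRep_append _ _ "dll.".toList _ (by decide),
    pvRep_append _ _ "dll.".toList _ (by decide), pvRep_append _ _ "dll.".toList _ (by decide),
    pvRep_append _ _ "dll.".toList _ (by decide), pvRep_fire _ (by decide) _,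
    pvRep_append _ _ "dll".toList _ (by decide), pvRep_append _ _ "dll".toList _ (by decide)]

theorem chain_key_dsb (u : List Char) :
    pvChain ("dsb.".toList ++ u) = "dsb".toList ++ pvChain u := by
  unfold pvChain
  rw [pvRep_append _ _ "dsb.".toList _ (by decide), pvRep_append _ _ "dsb.".toList _ (by decide),
    pvRep_append _ _ "dsb.".toList _ (by decide), pvRep_append _ _ "dsb.".toList _ (by decide),
    pvRep_append _ _ "dsb.".toList _ (by decide), pvRep_append _ _ "dsb.".toList _ (by decide),
    pvRep_fire _ (by decide) _, pvRep_append _ _ "dsb".toList _ (by decide)]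

theorem chain_key_dst (u : List Char) :
    pvChain ("dst.".toList ++ u) = "dst".toList ++ pvChain u := by
  unfold pvChain
  rw [pvRep_append _ _ "dst.".toList _ (by decide), pvRep_append _ _ "dst.".toList _ (by decide),
    pvRep_append _ _ "dst.".toList _ (by decide), pvRep_append _ _ "dst.".toList _ (by decide),
    pvRep_append _ _ "dst.".toList _ (by decide), pvRep_append _ _ "dst.".toList _ (by decide),
    pvRep_append _ _ "dst.".toList _ (by decide), pvRep_fire _ (by decide) _]

theorem chain_key_Mr (u : List Char) (hs : ¬ "s.".toList <+: u) :
    pvChain ("Mr.".toList ++ u) = "Mr".toList ++ pvChain u := by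
  unfold pvChain
  rw [pvRep_append _ _ "Mr.".toList _ (by decide), pvRep_append _ _ "Mr.".toList _ (by decide),
    pvRep_fire _ (by decide) _]
  have hs3 : ¬ "s.".toList <+: pvRep "Mr.".toList "Mr".toList
      (pvRep "Dr.".toList "Dr".toList (pvRep "No.".toList "No".toList u)) := by
    intro h
    have h2 := pvRep_prefix_stable "Mr.".toList "Mr".toList _ _ (by decide) h
    have h3 := pvRep_prefix_stable "Dr.".toList "Dr".toList _ _ (by decide) h2
    exact hs (pvRep_prefix_stable "No.".toList "No".toList _ _ (by decide) h3)
  rw [rep4_through_Mr _ hs3,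
    pvRep_append _ _ "Mr".toList _ (by decide), pvRep_append _ _ "Mr".toList _ (by decide),
    pvRep_append _ _ "Mr".toList _ (by decide), pvRep_append _ _ "Mr".toList _ (by decide)]

theorem chain_prefix_Mrs5 (u : List Char) :
    pvChain ("Mr.s.".toList ++ u) = "Mrs".toList ++ pvChain u := by
  unfold pvChain
  rw [pvRep_append _ _ "Mr.s.".toList _ (by decide), pvRep_append _ _ "Mr.s.".toList _ (by decide),
    show ("Mr.s.".toList ++ pvRep "Dr.".toList "Dr".toList (pvRep "No.".toList "No".toList u)) =
      "Mr.".toList ++ ("s.".toList ++ pvRep "Dr.".toList "Dr".toList (pvRep "No.".toList "No".toList u)) from rfl,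
    pvRep_fire _ (by decide) _, pvRep_append _ _ "s.".toList _ (by decide),
    show ("Mr".toList ++ ("s.".toList ++ pvRep "Mr.".toList "Mr".toList
      (pvRep "Dr.".toList "Dr".toList (pvRep "No.".toList "No".toList u)))) =
      "Mrs.".toList ++ pvRep "Mr.".toList "Mr".toList
        (pvRep "Dr.".toList "Dr".toList (pvRep "No.".toList "No".toList u)) from rfl,
    pvRep_fire _ (by decide) _,
    pvRep_append _ _ "Mrs".toList _ (by decide), pvRep_append _ _ "Mrs".toList _ (by decide),
    pvRep_append _ _ "Mrs".toList _ (by decide), pvRep_append _ _ "Mrs".toList _ (by decide)]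

theorem chain_cons_none {c : Char} {t : List Char}
    (hNo : ¬ "No.".toList <+: c :: t) (hDr : ¬ "Dr.".toList <+: c :: t)
    (hMr : ¬ "Mr.".toList <+: c :: t) (hMrs : ¬ "Mrs.".toList <+: c :: t)
    (hProf : ¬ "Prof.".toList <+: c :: t) (hdll : ¬ "dll.".toList <+: c :: t)
    (hdsb : ¬ "dsb.".toList <+: c :: t) (hdst : ¬ "dst.".toList <+: c :: t) :
    pvChain (c :: t) = c :: pvChain t := by
  unfold pvChain
  have e1 := pvRep_cons_neg (k := "No.".toList) "No".toList hNo
  -- transfer of a prefix fact across pass 1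
  have d1 : ∀ p : List Char,
      (∀ m, m < p.length → ¬ (p.drop m <+: "No".toList) ∧ ¬ ("No".toList <+: p.drop m)) →
      p <+: c :: pvRep "No.".toList "No".toList t → p <+: c :: t := fun p hp h =>
    pvRep_prefix_stable _ _ (c :: t) p hp (by rw [e1]; exact h)
  have hDr1 : ¬ "Dr.".toList <+: c :: pvRep "No.".toList "No".toList t := fun h =>
    hDr (d1 _ (by decide) h)
  have e2 := pvRep_cons_neg (k := "Dr.".toList) "Dr".toList hDr1
  have d2 : ∀ p : List Char,
      (∀ m, m < p.length → ¬ (p.drop m <+: "Dr".toList) ∧ ¬ ("Dr".toList <+: p.drop m)) →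
      (∀ m, m < p.length → ¬ (p.drop m <+: "No".toList) ∧ ¬ ("No".toList <+: p.drop m)) →
      p <+: c :: pvRep "Dr.".toList "Dr".toList (pvRep "No.".toList "No".toList t) →
      p <+: c :: t := fun p hp2 hp1 h =>
    d1 p hp1 (pvRep_prefix_stable _ _ _ p hp2 (by rw [e2]; exact h))
  have hMr2 : ¬ "Mr.".toList <+:
      c :: pvRep "Dr.".toList "Dr".toList (pvRep "No.".toList "No".toList t) := fun h =>
    hMr (d2 _ (by decide) (by decide) h)
  have e3 := pvRep_cons_neg (k := "Mr.".toList) "Mr".toList hMr2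
  have d3 : ∀ p : List Char,
      (∀ m, m < p.length → ¬ (p.drop m <+: "Mr".toList) ∧ ¬ ("Mr".toList <+: p.drop m)) →
      (∀ m, m < p.length → ¬ (p.drop m <+: "Dr".toList) ∧ ¬ ("Dr".toList <+: p.drop m)) →
      (∀ m, m < p.length → ¬ (p.drop m <+: "No".toList) ∧ ¬ ("No".toList <+: p.drop m)) →
      p <+: c :: pvRep "Mr.".toList "Mr".toList (pvRep "Dr.".toList "Dr".toList
        (pvRep "No.".toList "No".toList t)) → p <+: c :: t := fun p hp3 hp2 hp1 h =>
    d2 p hp2 hp1 (pvRep_prefix_stable _ _ _ p hp3 (by rw [e3]; exact h))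
  have hMrs3 : ¬ "Mrs.".toList <+:
      c :: pvRep "Mr.".toList "Mr".toList (pvRep "Dr.".toList "Dr".toList
        (pvRep "No.".toList "No".toList t)) := by
    intro h
    have h4 : "Mrs.".toList <+: pvRep "Mr.".toList "Mr".toList
        (c :: pvRep "Dr.".toList "Dr".toList (pvRep "No.".toList "No".toList t)) := by
      rw [e3]; exact h
    have h5 := mrs_prefix_stable _ hMr2 h4
    exact hMrs (d2 _ (by decide) (by decide) h5)
  have e4 := pvRep_cons_neg (k := "Mrs.".toList) "Mrs".toList hMrs3
  have d4 : ∀ p : List Char,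
      (∀ m, m < p.length → ¬ (p.drop m <+: "Mrs".toList) ∧ ¬ ("Mrs".toList <+: p.drop m)) →
      (∀ m, m < p.length → ¬ (p.drop m <+: "Mr".toList) ∧ ¬ ("Mr".toList <+: p.drop m)) →
      (∀ m, m < p.length → ¬ (p.drop m <+: "Dr".toList) ∧ ¬ ("Dr".toList <+: p.drop m)) →
      (∀ m, m < p.length → ¬ (p.drop m <+: "No".toList) ∧ ¬ ("No".toList <+: p.drop m)) →
      p <+: c :: pvRep "Mrs.".toList "Mrs".toList (pvRep "Mr.".toList "Mr".toList
        (pvRep "Dr.".toList "Dr".toList (pvRep "No.".toList "No".toList t))) →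
      p <+: c :: t := fun p hp4 hp3 hp2 hp1 h =>
    d3 p hp3 hp2 hp1 (pvRep_prefix_stable _ _ _ p hp4 (by rw [e4]; exact h))
  have hProf4 : ¬ "Prof.".toList <+: c :: pvRep "Mrs.".toList "Mrs".toList
      (pvRep "Mr.".toList "Mr".toList (pvRep "Dr.".toList "Dr".toList
        (pvRep "No.".toList "No".toList t))) := fun h =>
    hProf (d4 _ (by decide) (by decide) (by decide) (by decide) h)
  have e5 := pvRep_cons_neg (k := "Prof.".toList) "Prof".toList hProf4
  have d5 : ∀ p : List Char,
      (∀ m, m < p.length → ¬ (p.drop m <+: "Prof".toList) ∧ ¬ ("Prof".toList <+: p.drop m)) →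
      (∀ m, m < p.length → ¬ (p.drop m <+: "Mrs".toList) ∧ ¬ ("Mrs".toList <+: p.drop m)) →
      (∀ m, m < p.length → ¬ (p.drop m <+: "Mr".toList) ∧ ¬ ("Mr".toList <+: p.drop m)) →
      (∀ m, m < p.length → ¬ (p.drop m <+: "Dr".toList) ∧ ¬ ("Dr".toList <+: p.drop m)) →
      (∀ m, m < p.length → ¬ (p.drop m <+: "No".toList) ∧ ¬ ("No".toList <+: p.drop m)) →
      p <+: c :: pvRep "Prof.".toList "Prof".toList (pvRep "Mrs.".toList "Mrs".toList
        (pvRep "Mr.".toList "Mr".toList (pvRep "Dr.".toList "Dr".toList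
          (pvRep "No.".toList "No".toList t)))) → p <+: c :: t :=
    fun p hp5 hp4 hp3 hp2 hp1 h =>
    d4 p hp4 hp3 hp2 hp1 (pvRep_prefix_stable _ _ _ p hp5 (by rw [e5]; exact h))
  have hdll5 : ¬ "dll.".toList <+: c :: pvRep "Prof.".toList "Prof".toList
      (pvRep "Mrs.".toList "Mrs".toList (pvRep "Mr.".toList "Mr".toList
        (pvRep "Dr.".toList "Dr".toList (pvRep "No.".toList "No".toList t)))) := fun h =>
    hdll (d5 _ (by decide) (by decide) (by decide) (by decide) (by decide) h)
  have e6 := pvRep_cons_neg (k := "dll.".toList) "dll".toList hdll5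
  have d6 : ∀ p : List Char,
      (∀ m, m < p.length → ¬ (p.drop m <+: "dll".toList) ∧ ¬ ("dll".toList <+: p.drop m)) →
      (∀ m, m < p.length → ¬ (p.drop m <+: "Prof".toList) ∧ ¬ ("Prof".toList <+: p.drop m)) →
      (∀ m, m < p.length → ¬ (p.drop m <+: "Mrs".toList) ∧ ¬ ("Mrs".toList <+: p.drop m)) →
      (∀ m, m < p.length → ¬ (p.drop m <+: "Mr".toList) ∧ ¬ ("Mr".toList <+: p.drop m)) →
      (∀ m, m < p.length → ¬ (p.drop m <+: "Dr".toList) ∧ ¬ ("Dr".toList <+: p.drop m)) →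
      (∀ m, m < p.length → ¬ (p.drop m <+: "No".toList) ∧ ¬ ("No".toList <+: p.drop m)) →
      p <+: c :: pvRep "dll.".toList "dll".toList (pvRep "Prof.".toList "Prof".toList
        (pvRep "Mrs.".toList "Mrs".toList (pvRep "Mr.".toList "Mr".toList
          (pvRep "Dr.".toList "Dr".toList (pvRep "No.".toList "No".toList t))))) →
      p <+: c :: t := fun p hp6 hp5 hp4 hp3 hp2 hp1 h =>
    d5 p hp5 hp4 hp3 hp2 hp1 (pvRep_prefix_stable _ _ _ p hp6 (by rw [e6]; exact h))
  have hdsb6 : ¬ "dsb.".toList <+: c :: pvRep "dll.".toList "dll".toList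
      (pvRep "Prof.".toList "Prof".toList (pvRep "Mrs.".toList "Mrs".toList
        (pvRep "Mr.".toList "Mr".toList (pvRep "Dr.".toList "Dr".toList
          (pvRep "No.".toList "No".toList t))))) := fun h =>
    hdsb (d6 _ (by decide) (by decide) (by decide) (by decide) (by decide) (by decide) h)
  have e7 := pvRep_cons_neg (k := "dsb.".toList) "dsb".toList hdsb6
  have d7 : ∀ p : List Char,
      (∀ m, m < p.length → ¬ (p.drop m <+: "dsb".toList) ∧ ¬ ("dsb".toList <+: p.drop m)) →
      (∀ m, m < p.length → ¬ (p.drop m <+: "dll".toList) ∧ ¬ ("dll".toList <+: p.drop m)) →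
      (∀ m, m < p.length → ¬ (p.drop m <+: "Prof".toList) ∧ ¬ ("Prof".toList <+: p.drop m)) →
      (∀ m, m < p.length → ¬ (p.drop m <+: "Mrs".toList) ∧ ¬ ("Mrs".toList <+: p.drop m)) →
      (∀ m, m < p.length → ¬ (p.drop m <+: "Mr".toList) ∧ ¬ ("Mr".toList <+: p.drop m)) →
      (∀ m, m < p.length → ¬ (p.drop m <+: "Dr".toList) ∧ ¬ ("Dr".toList <+: p.drop m)) →
      (∀ m, m < p.length → ¬ (p.drop m <+: "No".toList) ∧ ¬ ("No".toList <+: p.drop m)) →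
      p <+: c :: pvRep "dsb.".toList "dsb".toList (pvRep "dll.".toList "dll".toList
        (pvRep "Prof.".toList "Prof".toList (pvRep "Mrs.".toList "Mrs".toList
          (pvRep "Mr.".toList "Mr".toList (pvRep "Dr.".toList "Dr".toList
            (pvRep "No.".toList "No".toList t)))))) → p <+: c :: t :=
    fun p hp7 hp6 hp5 hp4 hp3 hp2 hp1 h =>
    d6 p hp6 hp5 hp4 hp3 hp2 hp1 (pvRep_prefix_stable _ _ _ p hp7 (by rw [e7]; exact h))
  have hdst7 : ¬ "dst.".toList <+: c :: pvRep "dsb.".toList "dsb".toList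
      (pvRep "dll.".toList "dll".toList (pvRep "Prof.".toList "Prof".toList
        (pvRep "Mrs.".toList "Mrs".toList (pvRep "Mr.".toList "Mr".toList
          (pvRep "Dr.".toList "Dr".toList (pvRep "No.".toList "No".toList t)))))) := fun h =>
    hdst (d7 _ (by decide) (by decide) (by decide) (by decide) (by decide) (by decide)
      (by decide) h)
  have e8 := pvRep_cons_neg (k := "dst.".toList) "dst".toList hdst7
  rw [e1, e2, e3, e4, e5, e6, e7, e8]

theorem no_straddle (K : List Char) (u : List Char)
    (hd : ∀ m, m < K.length → ¬ ("Mr.s.".toList <+: K.drop m) ∧ ¬ (K.drop m <+: "Mr.s.".toList))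
    (h : "Mr.s.".toList <:+: K ++ u) : "Mr.s.".toList <:+: u := by
  rcases infix_append_cases K h with ⟨m, hm, hp⟩ | h2
  · rcases prefix_append_split hp with h3 | h3
    · exact absurd h3 (hd m hm).1
    · exact absurd h3 (hd m hm).2
  · exact h2

theorem some_case_generic (K R : List Char) (hK : K ≠ []) (u : List Char)
    (hchain : pvChain (K ++ u) = R ++ pvChain u)
    (hfind : pvAbbrs.find? (fun p => p.1.isPrefixOf (K ++ u)) = some (K, R))
    (ihlt : (pvChain u).length < (pvScanKeys pvAbbrs u).length) :
    (pvChain (K ++ u)).length < (pvScanKeys pvAbbrs (K ++ u)).length := by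
  obtain ⟨a, K', rfl⟩ : ∃ a K', K = a :: K' := by
    cases K with
    | nil => exact absurd rfl hK
    | cons a K' => exact ⟨a, K', rfl⟩
  rw [hchain, List.cons_append]
  have h1 := scanK_some (c := a) (t := K' ++ u) (q := (a :: K', R))
    (by rw [← List.cons_append]; exact hfind)
  rw [List.length_cons, Nat.add_sub_cancel, List.drop_left] at h1
  rw [h1]
  simp only [List.length_append]
  omega

theorem tight_lt : ∀ l, "Mr.s.".toList <:+: l →
    (pvChain l).length < (pvScanKeys pvAbbrs l).length := by
  suffices H : ∀ (n : Nat) (l : List Char), l.length ≤ n → "Mr.s.".toList <:+: l →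
      (pvChain l).length < (pvScanKeys pvAbbrs l).length by
    exact fun l h => H l.length l le_rfl h
  intro n
  induction n with
  | zero =>
    intro l hl hinf
    have : l = [] := List.eq_nil_of_length_eq_zero (Nat.le_zero.mp hl)
    subst this
    exact absurd hinf (by decide)
  | succ n ih =>
    have hLE : ∀ u : List Char, u.length ≤ n →
        (pvChain u).length ≤ (pvScanKeys pvAbbrs u).length := by
      intro u hu
      by_cases hin : "Mr.s.".toList <:+: u
      · exact Nat.le_of_lt (ih u hu hin)
      · rw [pvChain_eq_scan u hin]
    intro l hl hinf
    cases l with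
    | nil => exact absurd hinf (by decide)
    | cons c t =>
      by_cases hpre5 : "Mr.s.".toList <+: c :: t
      · obtain ⟨u, hu⟩ := hpre5
        rw [← hu]
        have hlenu : u.length ≤ n := by
          have hc := congrArg List.length hu
          simp only [List.length_append, List.length_cons] at hc hl
          have h5 : ("Mr.s.".toList).length = 5 := by decide
          omega
        rw [chain_prefix_Mrs5 u]
        have hfind : pvAbbrs.find? (fun p => p.1.isPrefixOf ("Mr.s.".toList ++ u)) =
            some ("Mr.".toList, "Mr".toList) := by
          show pvAbbrs.find? (fun p => p.1.isPrefixOf ('M'::'r'::'.'::'s'::'.'::u)) = _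
          simp [pvAbbrs, List.find?, List.isPrefixOf]
        have h1 := scanK_some (c := 'M') (t := 'r'::'.'::'s'::'.'::u)
          (q := ("Mr.".toList, "Mr".toList)) hfind
        rw [show (('r'::'.'::'s'::'.'::u).drop (("Mr.".toList).length - 1)) = 's'::'.'::u
          from rfl] at h1
        rw [show ("Mr.s.".toList ++ u) = 'M'::'r'::'.'::'s'::'.'::u from rfl, h1,
          scanK_none (no_key_head _ (by decide)), scanK_none (no_key_head _ (by decide))]
        have hle := hLE u hlenu
        simp only [List.length_append, List.length_cons]
        have e1 : ("Mrs".toList).length = 3 := by decide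
        have e2 : ("Mr".toList).length = 2 := by decide
        omega
      · cases hfind : pvAbbrs.find? (fun p => p.1.isPrefixOf (c :: t)) with
        | none =>
          have hn := List.find?_eq_none.mp hfind
          have key : ∀ p : List Char × List Char, p ∈ pvAbbrs → ¬ p.1 <+: c :: t :=
            fun p hp h => hn p hp (by simpa [List.isPrefixOf_iff_prefix] using h)
          rw [chain_cons_none (key ("No.".toList, "No".toList) (by decide))
              (key ("Dr.".toList, "Dr".toList) (by decide))
              (key ("Mr.".toList, "Mr".toList) (by decide))
              (key ("Mrs.".toList, "Mrs".toList) (by decide))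
              (key ("Prof.".toList, "Prof".toList) (by decide))
              (key ("dll.".toList, "dll".toList) (by decide))
              (key ("dsb.".toList, "dsb".toList) (by decide))
              (key ("dst.".toList, "dst".toList) (by decide)),
            scanK_cons pvAbbrs c t, hfind]
          have hit : "Mr.s.".toList <:+: t := by
            rcases List.infix_cons_iff.mp hinf with h | h
            · exact absurd h hpre5
            · exact h
          have := ih t (by simpa using hl) hit
          simpa using Nat.succ_lt_succ this
        | some p' =>
          have hmem := List.mem_of_find?_eq_some hfind
          have hp'pre : p'.1 <+: c :: t := by
            simpa [List.isPrefixOf_iff_prefix] using List.find?_some hfind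
          obtain ⟨u, hu⟩ := hp'pre
          simp only [pvAbbrs, List.mem_cons, List.not_mem_nil, or_false] at hmem
          simp only [List.length_cons] at hl
          rcases hmem with h|h|h|h|h|h|h|h <;> subst h <;> simp only at hu hfind <;>
            rw [← hu] at hinf hfind ⊢ <;>
            (have hcl := congrArg List.length hu ;
             simp only [List.length_append, List.length_cons] at hcl)
          · have hlenu : u.length ≤ n := by
              have e : ("No.".toList).length = 3 := by decide
              omega
            have hiu := no_straddle _ u (by decide) hinf
            exact some_case_generic _ _ (by decide) u (chain_key_No u) hfind
              (ih u hlenu hiu)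
          · have hlenu : u.length ≤ n := by
              have e : ("Dr.".toList).length = 3 := by decide
              omega
            have hiu := no_straddle _ u (by decide) hinf
            exact some_case_generic _ _ (by decide) u (chain_key_Dr u) hfind
              (ih u hlenu hiu)
          · -- "Mr." case
            have hlenu : u.length ≤ n := by
              have e : ("Mr.".toList).length = 3 := by decide
              omega
            have hs : ¬ "s.".toList <+: u := by
              intro h
              apply hpre5
              obtain ⟨w, hw⟩ := h
              refine ⟨w, ?_⟩
              rw [← hu, ← hw]
              rfl
            have hiu : "Mr.s.".toList <:+: u := by
              rcases infix_append_cases ("Mr.".toList) hinf with ⟨m, hm, hp⟩ | h2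
              · have hm3 : m < 3 := by
                  have e : ("Mr.".toList).length = 3 := by decide
                  omega
                clear hm
                interval_cases m
                · rcases prefix_append_split hp with h3 | h3
                  · exact absurd h3 (by decide)
                  · rw [show ("Mr.s.".toList) = "Mr.".toList ++ "s.".toList from rfl] at hp
                    exact absurd ((List.prefix_append_right_inj _).mp
                      (show "Mr.".toList ++ "s.".toList <+: "Mr.".toList ++ u from hp)) hs
                · rcases prefix_append_split hp with h3 | h3
                  · exact absurd h3 (by decide)
                  · exact absurd h3 (by decide)
                · rcases prefix_append_split hp with h3 | h3
                  · exact absurd h3 (by decide)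
                  · exact absurd h3 (by decide)
              · exact h2
            exact some_case_generic _ _ (by decide) u (chain_key_Mr u hs)
              hfind (ih u hlenu hiu)
          · have hlenu : u.length ≤ n := by
              have e : ("Mrs.".toList).length = 4 := by decide
              omega
            have hiu := no_straddle _ u (by decide) hinf
            exact some_case_generic _ _ (by decide) u (chain_key_Mrs u) hfind
              (ih u hlenu hiu)
          · have hlenu : u.length ≤ n := by
              have e : ("Prof.".toList).length = 5 := by decide
              omega
            have hiu := no_straddle _ u (by decide) hinf
            exact some_case_generic _ _ (by decide) u (chain_key_Prof u) hfind
              (ih u hlenu hiu)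
          · have hlenu : u.length ≤ n := by
              have e : ("dll.".toList).length = 4 := by decide
              omega
            have hiu := no_straddle _ u (by decide) hinf
            exact some_case_generic _ _ (by decide) u (chain_key_dll u) hfind
              (ih u hlenu hiu)
          · have hlenu : u.length ≤ n := by
              have e : ("dsb.".toList).length = 4 := by decide
              omega
            have hiu := no_straddle _ u (by decide) hinf
            exact some_case_generic _ _ (by decide) u (chain_key_dsb u) hfind
              (ih u hlenu hiu)
          · have hlenu : u.length ≤ n := by
              have e : ("dst.".toList).length = 4 := by decide
              omega
            have hiu := no_straddle _ u (by decide) hinf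
            exact some_case_generic _ _ (by decide) u (chain_key_dst u) hfind
              (ih u hlenu hiu)

-- ===== VERDICT (by name: the statement is the Claim_ definition above) =====
theorem normalize_abbreviations_spec : Claim_unchanged_normalize_abbreviations := by
  intro text _ hD
  rw [A_eq, alt_eq]
  refine congrArg _ (chain_eq text.toList (fun hin => hD ?_))
  exact (PySem.Chars.isIn_iff_infix _ _).mpr hin

theorem normalize_abbreviations_changed : Claim_changed_normalize_abbreviations := by
  unfold Claim_changed_normalize_abbreviations
  refine ⟨by decide, by decide, by decide, ?_, by decide⟩
  show normalize_abbreviations_alt "Mr.s." = "Mrs."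
  have hlist : pvScanKeys pvAbbrs "Mr.s.".toList = "Mrs.".toList := by
    rw [show ("Mr.s.".toList) = 'M' :: ['r', '.', 's', '.'] from by decide]
    rw [scanK_some (q := ("Mr.".toList, "Mr".toList)) (by decide)]
    rw [show (['r', '.', 's', '.'].drop (("Mr.".toList).length - 1)) = ['s', '.'] from by decide]
    rw [scanK_none (by decide), scanK_none (by decide), scanK_nil]
    decide
  rw [alt_eq, hlist]
  decide

theorem normalize_abbreviations_tight : Claim_exact_normalize_abbreviations := by
  intro text _ hD heq
  have hinf : "Mr.s.".toList <:+: text.toList := (PySem.Chars.isIn_iff_infix _ _).mp hD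
  have h2 : pvChain text.toList = pvScanKeys pvAbbrs text.toList := by
    have e1 := A_eq text
    rw [heq, alt_eq] at e1
    have e3 := congrArg String.toList e1
    rw [String.toList_ofList, String.toList_ofList] at e3
    unfold pvChain
    exact e3.symm
  exact (Nat.ne_of_lt (tight_lt text.toList hinf)) (congrArg List.length h2)
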